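/- GENERATED by mk_final_copies.py from the proof of the farm's unit `start_decoder.C7b` (farm:start_decoder.C7b.1: Proof.lean) as the
   re-elaboration sweep compiled it — do not edit. -/
import Asan.CheckWalk
import Vorbis.Spec.Units.start_decoder_C7b

open X86 X86.User Asan Vorbis Vorbis.Spec Vorbis.Spec.StartDecoder

set_option maxRecDepth 4000
set_option maxHeartbeats 4000000

namespace Vorbis.Spec.start_decoder_C7b

/-- **Segment C7b of `start_decoder`** (0x1149ba – 0x1149f1, the failure piece after compute_codewords returned 0): `mov rbp,
[rsp+18H]` (f: `Cur.slot_f`), the checked load of `c->sparse` (`C7.cb_site … 27 1`), then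
  dense  (0x1149cf): `error(f, 20)`, `jmp 0x113b22` — two walks (to the return of error, then the `jmp`);
  sparse (0x1149e1): `setup_temp_free(f, values, 0)` through its MACHINE-LEVEL contract (`weakSpec.pre`: `ObjLive.of_liveIn`,
         `ArenaOK.alloc_buffer_ne_zero` read through the push, `C7.built_bounds` for `values`, `sz = 0` for the last clause), then the
         same `error` call — three walks.
Both arms end in `C7.fail_exit`: ONE footprint from the entry state `v` (stack `[R − 408, R)`, `[f+132, f+136)`, `[f+140, f+144)`), the
shadow untouched (`setup_temp_free.weak_zero`, error's post), `rax = 0` from error's post (restated as `w_rax` BEFORE the last walk so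
that the `jmp` carries it). Facts that must survive a later walk are kept under names that do not start with `w_`. -/
theorem segC7b_walk {Lay : Layout} (hLay : Lay.hi = 0x1000000) {μ : Microarch} (hμ : UserX.MicroOK μ) {u₀ : State}
    (hcode : HasCodeNat Lay u₀ Vorbis.L.start_decoder.entry Vorbis.Code.code_start_decoder.nat Vorbis.L.start_decoder.size)
    (hld1 : Asan.SmallCheck Lay μ Vorbis.WayInv (Vorbis.CodeOK u₀) [.rax, .rdx] 1 Vorbis.L.__asan_load1_noabort.entry)
    (herr : ∀ (others : List Obj) (frames : List (Nat × FrameLayout)), Calls Lay μ Vorbis.WayInv (Vorbis.conv u₀) Vorbis.L.error.entry (Vorbis.Spec.error.spec others frames))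
    (hstf : ∀ (others : List Obj) (frames : List (Nat × FrameLayout)), Calls Lay μ Vorbis.WayInv (Vorbis.conv u₀) Vorbis.L.setup_temp_free.entry (Vorbis.Spec.setup_temp_free.weakSpec others frames))
    {g : Ghost} {i : Nat} {A2 A3 Ai Aw : Arena} {A : Arena × List Obj} {lengths values : Nat} {v : State}
    (hat : InC7F u₀ g i A2 A3 Ai Aw A lengths values v) :
    ReachVia Lay μ WayInv v (fun w => AtERR u₀ g w) := by
  obtain ⟨hfr, hb, hres⟩ := hat
  have he := hfr.entry
  v_entry he
  simp only [depth] at he_room he_stack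
  have w_rip := hfr.rip
  obtain ⟨hr1, hr2⟩ := hfr.r_eq
  simp only [steady] at hr1
  have hRA : g.RA = (g.e.reg .rsp).toNat := rfl
  have c_rsp : v.reg .rsp = g.e.reg .rsp - 1480 := by
    rw [hfr.rsp]
    refine (eq_addr _ _ ?_).symm
    unfold Ghost.R Ghost.RA steady
    u_omega
  have hcr := C7.cb_range hb.cur
  obtain ⟨hlen64, hval64, hvalsp⟩ := C7.built_bounds hb
  obtain ⟨cw, hcw⟩ : ∃ cw : Word, cw = addr (g.cb v.mem i) := ⟨_, rfl⟩
  have hcwn : cw.toNat = g.cb v.mem i := by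
    rw [hcw]
    exact toNat_addr _ (by omega)
  have c_r14 : v.reg .r14 = cw := by
    rw [hcw]
    exact hb.cur.r14
  have c_r12 := hb.r12
  have sl_f : v.mem.readLE (g.e.reg .rsp - 1456) 8 = g.f := by
    have e : addr (g.R + 0x18) = g.e.reg .rsp - 1456 := by
      refine (eq_addr _ _ ?_).symm
      unfold Ghost.R Ghost.RA steady
      u_omega
    rw [← e]
    exact hb.cur.slot_f
  -- the load of `c->sparse` (0x1149c8), named before the walk
  have r_sp : v.mem.readLE (cw + 27) 1 = Codebook.sparse v.mem (g.cb v.mem i) := by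
    have e1 : cw + 27 = addr (g.cb v.mem i + 27) := by
      rw [hcw, addr_add_lit]
    rw [e1]
    rfl
  have hsp01 := hb.k2.sparse_01
  have w_eq : Mem.EqOn Vorbis.L.textLo Vorbis.L.textHi u₀.mem v.mem := hfr.code
  have hdf : v.flags .df = false := (show abiInv _ from hfr.inv).1
  have hmx : v.mxcsr &&& 0x1F80 = 0x1F80 := (show abiInv _ from hfr.inv).2
  have hsse := Vorbis.sseOK_of_abiInv hfr.inv
  have herr' := herr A.2 g.frames'
  have hstf' := hstf A.2 g.frames'
  have t1 : (g.e.reg .rsp - 1488).toNat = (g.e.reg .rsp).toNat - 1488 := by u_omega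
  have hRn : g.R = (g.e.reg .rsp).toNat - 1480 := by omega
  have hst := C4.obj_stack hfr hb.cur.hand
  have hobr := hb.cur.sd.bits.OBR
  simp only [voff] at hobr
  have hfn : (UInt64.ofNat g.f).toNat = g.f := toNat_addr g.f (by omega)
  u_walk hcode [hμ.vendor] until [Vorbis.L.start_decoder.cut4] span [Vorbis.L.textLo, Vorbis.L.textHi] side (v_side)
  case check_1149c3 =>
    have hun : ShadowUntouched v.mem s_1149c3.mem := by v_untouched
    apply Vorbis.Spec.check_site hfr.shadow hun (C7.cb_site hb.cur 27 1 (by omega) (by omega))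
    u_omega
  case call_inv => v_inv
  case pre_1149ec =>
    have hun : ShadowUntouched v.mem s_1149ec.mem := by v_untouched
    have hsp1 : Codebook.sparse v.mem (g.cb v.mem i) = 1 := by omega
    obtain ⟨hv8, hvlo, hvhi⟩ := hvalsp hsp1
    have hf : (s_1149ec.reg .rdi).toNat = g.f := by
      rw [w_rdi]
      exact hfn
    have hrs : (s_1149ec.reg .rsp).toNat + 8 = g.R := by
      rw [w_rsp, t1]
      omega
    have hsi : (s_1149ec.reg .rsi).toNat = values := by
      rw [w_rsi]
      exact toNat_addr _ hval64
    have hz : (s_1149ec.reg .rdx).toNat % 2 ^ 32 = 0 := by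
      rw [w_rdx]
      rfl
    have er : r8 0 = 0 := by decide
    have hpush : Mem.SameExcept [⟨g.R - 408, g.R⟩] v.mem (v.mem.writeLE (g.e.reg .rsp - 1488) 8 1133041) := by
      apply Mem.SameExcept.writeLE
      · rw [t1]
        omega
      · refine ⟨_, List.mem_cons_self, ?_, ?_⟩
        · show g.R - 408 ≤ _
          rw [t1]
          omega
        · show _ ≤ g.R
          rw [t1]
          omega
    have hfeq : Mem.EqOn g.f (g.f + 1808) v.mem s_1149ec.mem := by
      rw [w_mem]
      apply hpush.eqOn
      intro w hw
      rw [List.mem_singleton.mp hw]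
      exact hst
    refine ⟨⟨?_, hfr.offText⟩, ?_, ?_, Or.inr ⟨?_, ?_, ?_⟩, Or.inr (Or.inl ?_)⟩
    · rw [hrs]
      exact hfr.shadow.untouched hun
    · rw [hf]
      exact ObjLive.of_liveIn (hb.cur.hand.obj.mono (C4.sub_frames g A))
    · rw [hf]
      have h0 := ArenaOK.alloc_buffer_ne_zero hb.cur.sd.arena
      simp only [vacc, voff] at h0 ⊢
      rw [hfeq.u64 (g.f + 112) (by omega) (by omega) (by omega)]
      exact h0
    · rw [hsi]
      exact hv8
    · rw [hsi]
      exact hvlo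
    · rw [hsi, hz, er]
      exact hvhi
    · rw [hz]
      exact er
  case call_inv => v_inv
  case pre_1149d7 =>
    have hun : ShadowUntouched v.mem s_1149d7.mem := by v_untouched
    have hf : (s_1149d7.reg .rdi).toNat = g.f := by
      rw [w_rdi]
      exact hfn
    have hrs : (s_1149d7.reg .rsp).toNat + 8 = g.R := by
      rw [w_rsp, t1]
      omega
    refine ⟨⟨?_, hfr.offText⟩, ?_⟩
    · rw [hrs]
      exact hfr.shadow.untouched hun
    · rw [hf]
      exact hb.cur.hand.obj.mono (C4.sub_frames g A)
  · -- the sparse arm: setup_temp_free returned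
    v_after_call w_rsp_1149ec w_mem_1149ec
    have hf : (s_1149ec.reg .rdi).toNat = g.f := by
      rw [w_rdi_1149ec]
      exact hfn
    have hsi : (s_1149ec.reg .rsi).toNat = values := by
      rw [w_rsi_1149ec]
      exact toNat_addr _ hval64
    have hz : (s_1149ec.reg .rdx).toNat % 2 ^ 32 = 0 := by
      rw [w_rdx_1149ec]
      rfl
    have er : r8 0 = 0 := by decide
    simp only [hf, hsi, hz, er, t1] at w_same
    have hun2 : ShadowUntouched s_1149ec.mem s_1149ecr.mem := setup_temp_free.weak_zero w_post hz
    rw [w_mem_1149ec] at hun2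
    have hsp1 : Codebook.sparse v.mem (g.cb v.mem i) = 1 := by omega
    obtain ⟨hv8, hvlo, hvhi⟩ := hvalsp hsp1
    -- the caller's push and setup_temp_free's footprint (its empty shadow window dropped) as ONE footprint from `v`
    have hpush1 : Mem.SameExcept [⟨g.R - 408, g.R⟩] v.mem (v.mem.writeLE (g.e.reg .rsp - 1488) 8 1133041) := by
      apply Mem.SameExcept.writeLE
      · rw [t1]
        omega
      · refine ⟨_, List.mem_cons_self, ?_, ?_⟩
        · show g.R - 408 ≤ _
          rw [t1]
          omega
        · show _ ≤ g.R
          rw [t1]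
          omega
    have hun1 : ShadowUntouched v.mem (v.mem.writeLE (g.e.reg .rsp - 1488) 8 1133041) := by
      apply hpush1.eqOn
      intro w hw
      rw [List.mem_singleton.mp hw]
      simp only
      omega
    have hunA : ShadowUntouched v.mem s_1149ecr.mem := Mem.EqOn.trans hun1 hun2
    have hsame1 : Mem.SameExcept [⟨g.R - 408, g.R⟩, ⟨(g.e.reg .rsp).toNat - 1488 - 48, (g.e.reg .rsp).toNat - 1488⟩,
        ⟨g.f + 132, g.f + 136⟩, ⟨g.f + 140, g.f + 140 + 4⟩] v.mem s_1149ecr.mem := by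
      refine (C7.sameExcept_weaken hpush1 ?_).trans (C7.sameExcept_drop_shadow w_same hun2 ?_)
      · intro w hw
        rw [List.mem_singleton.mp hw]
        exact List.mem_cons_self
      · intro w hw
        simp only [List.mem_cons, List.mem_nil_iff, or_false] at hw ⊢
        rcases hw with rfl | rfl | rfl
        · exact Or.inl (Or.inr (Or.inl rfl))
        · exact Or.inl (Or.inr (Or.inr (Or.inl rfl)))
        · right
          unfold shadowSpan
          simp only
          omega
    u_walk hcode [hμ.vendor] until [Vorbis.L.start_decoder.cut4] span [Vorbis.L.textLo, Vorbis.L.textHi] side (v_side)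
    case call_inv => v_inv
    case pre_1149d7 =>
      have hpush2 : Mem.SameExcept [⟨g.R - 408, g.R⟩] s_1149ecr.mem
          (s_1149ecr.mem.writeLE (g.e.reg .rsp - 1488) 8 1133020) := by
        apply Mem.SameExcept.writeLE
        · rw [t1]
          omega
        · refine ⟨_, List.mem_cons_self, ?_, ?_⟩
          · show g.R - 408 ≤ _
            rw [t1]
            omega
          · show _ ≤ g.R
            rw [t1]
            omega
      have hun : ShadowUntouched v.mem s_1149d7.mem := by
        rw [w_mem]
        refine Mem.EqOn.trans hunA ?_
        apply hpush2.eqOn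
        intro w hw
        rw [List.mem_singleton.mp hw]
        simp only
        omega
      have hf' : (s_1149d7.reg .rdi).toNat = g.f := by
        rw [w_rdi]
        exact hfn
      have hrs : (s_1149d7.reg .rsp).toNat + 8 = g.R := by
        rw [w_rsp, t1]
        omega
      refine ⟨⟨?_, hfr.offText⟩, ?_⟩
      · rw [hrs]
        exact hfr.shadow.untouched hun
      · rw [hf']
        exact hb.cur.hand.obj.mono (C4.sub_frames g A)
    -- error returned
    v_after_call w_rsp_1149d7 w_mem_1149d7
    have hf' : (s_1149d7.reg .rdi).toNat = g.f := by
      rw [w_rdi_1149d7]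
      exact hfn
    simp only [hf', t1] at w_same
    have hp : s_1149d7r.reg .rax = 0 ∧ ShadowUntouched s_1149d7.mem s_1149d7r.mem ∧
        s_1149d7r.mem.readLE (s_1149d7.reg .rdi + 140) 4 = (s_1149d7.reg .rsi).toNat % 2 ^ 32 := w_post
    have w_rax : s_1149d7r.reg .rax = 0 := hp.1
    have hun3 : ShadowUntouched s_1149d7.mem s_1149d7r.mem := hp.2.1
    rw [w_mem_1149d7] at hun3
    have hsame3 := w_same
    u_walk hcode [hμ.vendor] until [Vorbis.L.start_decoder.cut4] span [Vorbis.L.textLo, Vorbis.L.textHi] side (v_side)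
    have hpush2 : Mem.SameExcept [⟨g.R - 408, g.R⟩] s_1149ecr.mem
        (s_1149ecr.mem.writeLE (g.e.reg .rsp - 1488) 8 1133020) := by
      apply Mem.SameExcept.writeLE
      · rw [t1]
        omega
      · refine ⟨_, List.mem_cons_self, ?_, ?_⟩
        · show g.R - 408 ≤ _
          rw [t1]
          omega
        · show _ ≤ g.R
          rw [t1]
          omega
    have hs : Mem.SameExcept [⟨g.R - 408, g.R⟩, ⟨(g.e.reg .rsp).toNat - 1488 - 48, (g.e.reg .rsp).toNat - 1488⟩,
        ⟨g.f + 132, g.f + 136⟩, ⟨g.f + 140, g.f + 140 + 4⟩] v.mem s_1149dc.mem := by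
      rw [w_mem]
      refine (hsame1.trans (C7.sameExcept_weaken hpush2 ?_)).trans (C7.sameExcept_weaken hsame3 ?_)
      · intro w hw
        rw [List.mem_singleton.mp hw]
        exact List.mem_cons_self
      · intro w hw
        simp only [List.mem_cons, List.mem_nil_iff, or_false] at hw ⊢
        rcases hw with rfl | rfl
        · exact Or.inr (Or.inl rfl)
        · exact Or.inr (Or.inr (Or.inr rfl))
    have hsh : ShadowUntouched v.mem s_1149dc.mem := by
      rw [w_mem]
      refine Mem.EqOn.trans (Mem.EqOn.trans hunA ?_) hun3
      apply hpush2.eqOn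
      intro w hw
      rw [List.mem_singleton.mp hw]
      simp only
      omega
    have hw : ∀ x, x ∈ [(⟨g.R - 408, g.R⟩ : Span), ⟨(g.e.reg .rsp).toNat - 1488 - 48, (g.e.reg .rsp).toNat - 1488⟩,
        ⟨g.f + 132, g.f + 136⟩, ⟨g.f + 140, g.f + 140 + 4⟩] → C7.FailWin g x := by
      intro x hx
      simp only [List.mem_cons, List.mem_nil_iff, or_false] at hx
      unfold C7.FailWin
      rcases hx with rfl | rfl | rfl | rfl <;> simp only [] <;> omega
    have hinv' : abiInv s_1149dc := by
      refine Vorbis.abiInv_of ?_ ?_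
      · rw [w_flags]
        exact w_df
      · rw [w_mxcsr]
        exact w_mx
    have hrsp' : s_1149dc.reg .rsp = v.reg .rsp := by
      rw [w_rsp, c_rsp]
    exact ReachVia.done (C7.fail_exit hfr hb.cur hs hsh hw w_rip hrsp' w_eq hinv' w_rax)
  · -- the dense arm: error returned
    v_after_call w_rsp_1149d7 w_mem_1149d7
    have hf : (s_1149d7.reg .rdi).toNat = g.f := by
      rw [w_rdi_1149d7]
      exact hfn
    simp only [hf, t1] at w_same
    have hp : s_1149d7r.reg .rax = 0 ∧ ShadowUntouched s_1149d7.mem s_1149d7r.mem ∧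
        s_1149d7r.mem.readLE (s_1149d7.reg .rdi + 140) 4 = (s_1149d7.reg .rsi).toNat % 2 ^ 32 := w_post
    have w_rax : s_1149d7r.reg .rax = 0 := hp.1
    u_walk hcode [hμ.vendor] until [Vorbis.L.start_decoder.cut4] span [Vorbis.L.textLo, Vorbis.L.textHi] side (v_side)
    have hpush : Mem.SameExcept [⟨g.R - 408, g.R⟩] v.mem (v.mem.writeLE (g.e.reg .rsp - 1488) 8 1133020) := by
      apply Mem.SameExcept.writeLE
      · rw [t1]
        omega
      · refine ⟨_, List.mem_cons_self, ?_, ?_⟩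
        · show g.R - 408 ≤ _
          rw [t1]
          omega
        · show _ ≤ g.R
          rw [t1]
          omega
    have hs : Mem.SameExcept [⟨g.R - 408, g.R⟩, ⟨(g.e.reg .rsp).toNat - 1488 - 48, (g.e.reg .rsp).toNat - 1488⟩,
        ⟨g.f + 140, g.f + 140 + 4⟩] v.mem s_1149dc.mem := by
      rw [w_mem]
      refine (C7.sameExcept_weaken hpush ?_).trans (C7.sameExcept_weaken w_same ?_)
      · intro w hw
        rw [List.mem_singleton.mp hw]
        exact List.mem_cons_self
      · intro w hw
        exact List.mem_cons_of_mem _ hw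
    have hun1 : ShadowUntouched v.mem s_1149d7.mem := by
      rw [w_mem_1149d7]
      apply hpush.eqOn
      intro w hw
      rw [List.mem_singleton.mp hw]
      simp only
      omega
    have hsh : ShadowUntouched v.mem s_1149dc.mem := by
      rw [w_mem]
      exact Mem.EqOn.trans hun1 hp.2.1
    have hw : ∀ x, x ∈ [(⟨g.R - 408, g.R⟩ : Span), ⟨(g.e.reg .rsp).toNat - 1488 - 48, (g.e.reg .rsp).toNat - 1488⟩,
        ⟨g.f + 140, g.f + 140 + 4⟩] → C7.FailWin g x := by
      intro x hx
      simp only [List.mem_cons, List.mem_nil_iff, or_false] at hx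
      unfold C7.FailWin
      rcases hx with rfl | rfl | rfl <;> simp only [] <;> omega
    have hinv' : abiInv s_1149dc := by
      refine Vorbis.abiInv_of ?_ ?_
      · rw [w_flags]
        exact w_df
      · rw [w_mxcsr]
        exact w_mx
    have hrsp' : s_1149dc.reg .rsp = v.reg .rsp := by
      rw [w_rsp, c_rsp]
    exact ReachVia.done (C7.fail_exit hfr hb.cur hs hsh hw w_rip hrsp' w_eq hinv' w_rax)

end Vorbis.Spec.start_decoder_C7b

theorem Vorbis.Spec.Worked.start_decoder_C7b_ok : Vorbis.Spec.start_decoder_C7b.Statement := by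
  intro Lay hLay μ hμ u₀ hcode hld1 herr hstf g i v hat
  obtain ⟨A, lengths, values, A2, A3, Ai, Aw, hin⟩ := hat
  exact Vorbis.Spec.start_decoder_C7b.segC7b_walk hLay hμ hcode hld1 herr hstf hin
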